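-- pv_equiv track=rewrite | github.com/davidmzeng/beat-the-landlord | beat_the_landlord.py | is_sequence_of_triplets
-- ===== SOURCE A (Python) =====
-- RANK_ORDER = ("3", "4", "5", "6", "7", "8", "9", "10", "J", "Q", "K", "A", "2", "B", "R")
--
-- def sorted_cards(cards):
--     """
--     Takes cards as an argument and returns a new group of sorted cards
--     """
--     for card in cards: # check for invalid cards
--         if card not in RANK_ORDER:
--             raise ValueError("invalid card found")
--     sorted_result = []
--     for rank in RANK_ORDER: # iterate in sorted order
--         for card in cards:
--             if card == rank:
--                 sorted_result.append(card)
--     return sorted_result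
--
-- def get_rank(card):
--     """
--     Takes a card as an argument and returns a value representing its relative
--     rank compared with other cards
--     """
--     if card not in RANK_ORDER: # check that card isn't invalid
--         raise ValueError("invalid card")
--     return RANK_ORDER.index(card)
--
-- def is_sequence_of_triplets(combo):
--     """
--     Takes a combo as an argument and returns True if it is a "sequence of triplets" combo type,
--     returns False otherwise
--     """
--     for card in combo: # check for invalid cards
--         if card not in RANK_ORDER:
--             return False
--     if "2" in combo or "B" in combo or "R" in combo: # check for invalid cards used in combo
--         return False
--     rank_counts = {}
--     for card in combo: # put combo into a dictionary representing frequency of each card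
--         if card not in rank_counts:
--             rank_counts[card] = 1
--         else:
--             rank_counts[card] += 1
--     for rank in rank_counts: # check all cards used are triplets
--         if rank_counts[rank] != 3:
--             return False
--     if len(rank_counts) < 2: # check for at least 2 triplets
--         return False
--     ranks_list = list(rank_counts.keys())
--     sorted_ranks_list = sorted_cards(ranks_list) # get a sorted list of the ranks in combo
--     for i in range(len(sorted_ranks_list) - 1): # check ranks are consecutive
--         if get_rank(sorted_ranks_list[i]) != get_rank(sorted_ranks_list[i + 1]) - 1:
--             return False
--     return True
-- ===== SOURCE B (Python) =====
-- RANK_ORDER = ("3", "4", "5", "6", "7", "8", "9", "10", "J", "Q", "K", "A", "2", "B", "R")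
--
--
-- def _groups(idxs, prev):
--     """Walk a sorted index list three entries at a time: each group of three must be
--     one rank repeated thrice, exactly one above the previous group's rank."""
--     if not idxs:
--         return True
--     a, b, c = idxs[0], idxs[1], idxs[2]
--     return a == b == c == prev + 1 and _groups(idxs[3:], a)
--
--
-- def is_sequence_of_triplets(combo):
--     playable = RANK_ORDER.index("2")  # ranks below "2" are the only ones allowed
--     idxs = []
--     for card in combo:
--         if card not in RANK_ORDER or RANK_ORDER.index(card) >= playable:
--             return False
--         idxs.append(RANK_ORDER.index(card))
--     idxs.sort()
--     if len(idxs) < 6 or len(idxs) % 3 != 0: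
--         return False
--     return _groups(idxs, idxs[0] - 1)
-- ===== Notes on version B (the rewrite author's own statement) =====
-- stated objective: alternative
-- what changed: Replaces A's frequency dict plus bucket-sort of the distinct keys and separate all-triplets / size / adjacent-rank loops by a single pass mapping each card to its rank index, one sort of the full index multiset, and one walk over it in groups of three that checks triple-equality and +1 consecutiveness at once.
import Mathlib
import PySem

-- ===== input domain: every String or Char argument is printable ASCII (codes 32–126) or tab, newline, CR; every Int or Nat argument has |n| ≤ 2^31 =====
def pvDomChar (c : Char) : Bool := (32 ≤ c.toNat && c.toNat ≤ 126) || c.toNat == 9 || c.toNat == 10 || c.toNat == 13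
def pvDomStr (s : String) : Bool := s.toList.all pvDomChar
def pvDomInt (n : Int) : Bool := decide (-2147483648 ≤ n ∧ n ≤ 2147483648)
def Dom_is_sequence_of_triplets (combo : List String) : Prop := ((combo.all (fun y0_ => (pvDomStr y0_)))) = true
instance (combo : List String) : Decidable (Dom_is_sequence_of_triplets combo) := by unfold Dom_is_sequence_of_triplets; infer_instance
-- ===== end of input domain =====

-- B replaces A's frequency dict + bucket-sort of distinct keys + three separate check loops by one
-- pass to rank indices, one sort of the full index multiset, and one grouped walk (alternative decomposition).

-- ===== PORT A =====
def pvRanks : List String := ["3","4","5","6","7","8","9","10","J","Q","K","A","2","B","R"]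

-- A's sorted_cards; its ValueError branch is unreachable at A's call site (keys were validated), ported as []
def pvSortedCards (cards : List String) : List String :=
  if cards.any (fun card => !(pvRanks.contains card)) then []
  else pvRanks.foldl (fun acc rank =>
    cards.foldl (fun acc2 card => if card == rank then acc2 ++ [card] else acc2) acc) []

-- A's get_rank; its ValueError branch is unreachable at A's call sites (cards validated), ported with default 0
def pvGetRank (card : String) : Int :=
  (((PySem.List.index? pvRanks card).getD 0 : Nat) : Int)

def is_sequence_of_triplets (combo : List String) : Bool :=
  if combo.any (fun card => !(pvRanks.contains card)) then false
  else if combo.contains "2" || combo.contains "B" || combo.contains "R" then false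
  else
    let rank_counts : PySem.Dict String Int := combo.foldl
      (fun d card => if d.contains card then d.modify card 0 (· + 1) else d.insert card 1)
      PySem.Dict.empty
    -- rank_counts[rank] with rank ∈ keys: KeyError unreachable, getD 0
    if rank_counts.keys.any (fun rank => rank_counts.getD rank 0 != 3) then false
    else if rank_counts.size < 2 then false
    else
      let sorted_ranks_list := pvSortedCards rank_counts.keys
      if (PySem.List.pyRange 0 (PySem.List.len sorted_ranks_list - 1) 1).any (fun i =>
           pvGetRank (PySem.List.pyGetD sorted_ranks_list i "") !=
           pvGetRank (PySem.List.pyGetD sorted_ranks_list (i + 1) "") - 1)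
      then false
      else true

-- ===== PORT B =====
def pvCollectIdxs (playable : Nat) : List String → Option (List Int)
  | [] => some []
  | card :: rest =>
    match PySem.List.index? pvRanks card with
    | none => none
    | some i =>
      if playable ≤ i then none
      else (pvCollectIdxs playable rest).map (fun t => ((i : Nat) : Int) :: t)

-- walk the sorted index list three entries at a time; the under-three catch-all is unreachable
-- (the caller checked the length is a multiple of 3; Python would raise IndexError there)
def pvGroups : List Int → Int → Bool
  | [], _ => true
  | a :: b :: c :: rest, prev => a == b && b == c && c == prev + 1 && pvGroups rest a
  | _, _ => false

def is_sequence_of_triplets_alt (combo : List String) : Bool :=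
  let playable := (PySem.List.index? pvRanks "2").getD 0
  match pvCollectIdxs playable combo with
  | none => false
  | some idxs =>
    let s := PySem.List.sorted idxs (fun x => x) false
    if PySem.List.len s < 6 || PySem.Int.mod (PySem.List.len s) 3 != 0 then false
    else pvGroups s (PySem.List.pyGetD s 0 0 - 1)

-- ===== PRECONDITION & SPEC =====
def Spec_is_sequence_of_triplets (combo : List String) (out : Bool) : Prop := out = is_sequence_of_triplets_alt combo
instance (combo : List String) (out : Bool) : Decidable (Spec_is_sequence_of_triplets combo out) := by unfold Spec_is_sequence_of_triplets; infer_instance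

-- ===== CLAIM (what is proved, stated in full; the proofs are below) =====
def Claim_equal_is_sequence_of_triplets : Prop := ∀ (combo : List String), Dom_is_sequence_of_triplets combo → Spec_is_sequence_of_triplets combo (is_sequence_of_triplets combo)

-- ===== LEMMAS AND PROOFS =====

-- the twelve ranks a sequence-of-triplets may use (indices 0..11 of pvRanks)
def pvLow : List String := ["3","4","5","6","7","8","9","10","J","Q","K","A"]

def pvValid (combo : List String) : Prop := ∀ c ∈ combo, c ∈ pvLow

-- 3k consecutive indices starting at p+1, each repeated three times
def pvRunFrom (p : Int) : Nat → List Int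
  | 0 => []
  | k+1 => (p+1) :: (p+1) :: (p+1) :: pvRunFrom (p+1) k

def pvConsec (sl : List String) : Prop :=
  ∀ i : Nat, i + 1 < sl.length → pvGetRank (sl.getD i "") = pvGetRank (sl.getD (i+1) "") - 1

def pvCond (combo : List String) : Prop :=
  (∀ c ∈ combo, combo.count c = 3) ∧ 2 ≤ (PySem.Set.ofList combo).length ∧
    pvConsec (pvLow.filter (fun r => decide (r ∈ PySem.Set.ofList combo)))

def pvIdxs (combo : List String) : List Int := combo.map pvGetRank

def pvCondB (combo : List String) : Prop :=
  ∃ p k, 2 ≤ k ∧ PySem.List.sorted (pvIdxs combo) (fun x => x) false = pvRunFrom p k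

lemma pv_mem_low_iff (c : String) : c ∈ pvLow ↔ c ∈ pvRanks ∧ c ≠ "2" ∧ c ≠ "B" ∧ c ≠ "R" := by
  simp only [pvLow, pvRanks, List.mem_cons, List.not_mem_nil, or_false]
  constructor
  · rintro (rfl|rfl|rfl|rfl|rfl|rfl|rfl|rfl|rfl|rfl|rfl|rfl) <;> refine ⟨by tauto, by decide, by decide, by decide⟩
  · rintro ⟨h, h2, hB, hR⟩
    rcases h with rfl|rfl|rfl|rfl|rfl|rfl|rfl|rfl|rfl|rfl|rfl|rfl|rfl|rfl|rfl <;> tauto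


lemma pv_counter_eq (combo : List String) :
    combo.foldl (fun d card => if d.contains card then d.modify card 0 (· + 1) else d.insert card 1)
      (PySem.Dict.empty : PySem.Dict String Int) = PySem.Dict.counter combo := by
  have hfun : (fun (d : PySem.Dict String Int) card =>
      if d.contains card then d.modify card 0 (· + 1) else d.insert card 1)
      = (fun (d : PySem.Dict String Int) card => d.insert card (d.getD card 0 + 1)) := by
    funext d card
    by_cases h : d.contains card = true
    · simp only [h, if_true]; rfl
    · rw [Bool.not_eq_true] at h
      simp only [h, Bool.false_eq_true, if_false, PySem.Dict.getD_of_not_contains d 0 h, zero_add]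
  rw [hfun, PySem.Dict.foldl_insert_getD_add_one_eq_counter]


lemma pv_filter_beq_of_nodup (S : List String) (hnd : S.Nodup) (r : String) :
    S.filter (fun c => c == r) = if r ∈ S then [r] else [] := by
  induction S with
  | nil => simp
  | cons a S ih =>
    obtain ⟨ha, hnd'⟩ := List.nodup_cons.mp hnd
    by_cases har : a = r
    · subst har
      have hnil : S.filter (fun c => c == a) = [] :=
        List.filter_eq_nil_iff.mpr (fun c hc => by simp; rintro rfl; exact ha hc)
      simp [hnil]
    · have hba : (a == r) = false := by simp [har]
      have hra : ¬ r = a := fun h => har h.symm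
      simp [hba, ih hnd', List.mem_cons, hra]


lemma pv_flatMap_if_singleton (l : List String) (S : List String) :
    l.flatMap (fun r => if r ∈ S then [r] else []) = l.filter (fun r => decide (r ∈ S)) := by
  induction l with
  | nil => rfl
  | cons a l ih =>
    simp only [List.flatMap_cons, List.filter_cons, ih]
    by_cases h : a ∈ S <;> simp [h]

lemma pv_sortedCards_eq (S : List String) (hnd : S.Nodup) (hsub : ∀ c ∈ S, c ∈ pvLow) :
    pvSortedCards S = pvLow.filter (fun r => decide (r ∈ S)) := by
  have hguard : S.any (fun card => !(pvRanks.contains card)) = false := by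
    rw [List.any_eq_false]
    intro c hc
    have : c ∈ pvRanks := ((pv_mem_low_iff c).mp (hsub c hc)).1
    simp [this]
  unfold pvSortedCards
  rw [hguard]
  simp only [Bool.false_eq_true, if_false]
  calc pvRanks.foldl (fun acc rank =>
        S.foldl (fun acc2 card => if card == rank then acc2 ++ [card] else acc2) acc) []
      = pvRanks.foldl (fun acc rank => acc ++ S.filter (fun c => c == rank)) [] := by
        apply PySem.List.foldl_congr_mem
        intro acc x _
        exact PySem.List.foldl_append_if_eq_filter _ _ _
    _ = [] ++ pvRanks.flatMap (fun rank => S.filter (fun c => c == rank)) :=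
        PySem.List.foldl_append_eq_flatMap (fun rank => S.filter (fun c => c == rank)) pvRanks []
    _ = pvRanks.flatMap (fun rank => if rank ∈ S then [rank] else []) := by
        rw [List.nil_append]
        congr 1
        funext r
        exact pv_filter_beq_of_nodup S hnd r
    _ = pvRanks.filter (fun r => decide (r ∈ S)) := pv_flatMap_if_singleton pvRanks S
    _ = pvLow.filter (fun r => decide (r ∈ S)) := by
        rw [show pvRanks = pvLow ++ ["2","B","R"] from rfl, List.filter_append]
        have n2 : "2" ∉ S := fun hm => absurd (hsub _ hm) (by decide)
        have nB : "B" ∉ S := fun hm => absurd (hsub _ hm) (by decide)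
        have nR : "R" ∉ S := fun hm => absurd (hsub _ hm) (by decide)
        simp [n2, nB, nR]

lemma pv_valid_guards (combo : List String) :
    (combo.any (fun card => !(pvRanks.contains card)) = false ∧
      (combo.contains "2" || combo.contains "B" || combo.contains "R") = false) ↔ pvValid combo := by
  simp only [List.any_eq_false, Bool.not_eq_true', List.contains_eq_mem, decide_eq_false_iff_not,
    Bool.or_eq_false_iff, not_not]
  constructor
  · rintro ⟨h1, ⟨h2, h3⟩, h4⟩ c hc
    refine (pv_mem_low_iff c).mpr ⟨h1 c hc, ?_, ?_, ?_⟩ <;> rintro rfl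
    · exact h2 hc
    · exact h3 hc
    · exact h4 hc
  · intro hv
    refine ⟨fun c hc => ((pv_mem_low_iff c).mp (hv c hc)).1, ⟨?_, ?_⟩, ?_⟩
    · intro hc; exact ((pv_mem_low_iff _).mp (hv _ hc)).2.1 rfl
    · intro hc; exact ((pv_mem_low_iff _).mp (hv _ hc)).2.2.1 rfl
    · intro hc; exact ((pv_mem_low_iff _).mp (hv _ hc)).2.2.2 rfl

lemma pv_consec_iff (sl : List String) :
    ((PySem.List.pyRange 0 (PySem.List.len sl - 1) 1).any (fun i =>
      pvGetRank (PySem.List.pyGetD sl i "") != pvGetRank (PySem.List.pyGetD sl (i + 1) "") - 1)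
      = false) ↔ pvConsec sl := by
  rw [List.any_eq_false]
  constructor
  · intro h i hi
    have hm : (i : Int) ∈ PySem.List.pyRange 0 (PySem.List.len sl - 1) 1 := by
      rw [PySem.List.mem_pyRange_one, PySem.List.len_eq]
      omega
    have hx := h _ hm
    rw [show ((i : Int) + 1) = ((i + 1 : Nat) : Int) by push_cast; ring] at hx
    simp only [PySem.List.pyGetD_natCast] at hx
    simpa using hx
  · intro h x hx
    rw [PySem.List.mem_pyRange_one, PySem.List.len_eq] at hx
    obtain ⟨h0, hlt⟩ := hx
    rw [show x = ((x.toNat : Nat) : Int) from (Int.toNat_of_nonneg h0).symm,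
      show ((x.toNat : Nat) : Int) + 1 = ((x.toNat + 1 : Nat) : Int) by push_cast; ring]
    have hh := h x.toNat (by omega)
    simp only [PySem.List.pyGetD_natCast]
    simpa using hh

lemma pv_A_iff (combo : List String) :
    is_sequence_of_triplets combo = true ↔ pvValid combo ∧ pvCond combo := by
  by_cases hv : pvValid combo
  case neg =>
    have hng : ¬ (combo.any (fun card => !(pvRanks.contains card)) = false ∧
        (combo.contains "2" || combo.contains "B" || combo.contains "R") = false) :=
      fun hg => hv ((pv_valid_guards combo).mp hg)
    simp only [is_sequence_of_triplets]
    by_cases h1 : combo.any (fun card => !(pvRanks.contains card)) = true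
    · rw [h1, if_pos rfl]
      exact iff_of_false (by simp) (fun hc => hv hc.1)
    · rw [Bool.not_eq_true] at h1
      have h2 : (combo.contains "2" || combo.contains "B" || combo.contains "R") = true := by
        cases h : (combo.contains "2" || combo.contains "B" || combo.contains "R")
        · exact absurd ⟨h1, h⟩ hng
        · rfl
      rw [h1, h2, if_neg (by simp), if_pos rfl]
      exact iff_of_false (by simp) (fun hc => hv hc.1)
  case pos =>
    obtain ⟨hg1, hg2⟩ := (pv_valid_guards combo).mpr hv
    simp only [is_sequence_of_triplets]
    rw [hg1, hg2]
    simp only [Bool.false_eq_true, if_false]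
    rw [pv_counter_eq]
    have hkeys : (PySem.Dict.counter combo).keys = PySem.Set.ofList combo :=
      PySem.Dict.keys_counter combo
    have hsub : ∀ c ∈ PySem.Set.ofList combo, c ∈ pvLow :=
      fun c hc => hv c ((PySem.Set.mem_ofList _ _).mp hc)
    by_cases h3 : ∀ c ∈ combo, combo.count c = 3
    · have g3 : ((PySem.Dict.counter combo).keys.any
          (fun rank => (PySem.Dict.counter combo).getD rank 0 != 3)) = false := by
        rw [List.any_eq_false]
        intro r hr
        rw [hkeys] at hr
        rw [PySem.Dict.getD_counter]
        have := h3 r ((PySem.Set.mem_ofList _ _).mp hr)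
        simp [this]
      rw [g3]
      simp only [Bool.false_eq_true, if_false]
      have hsize : (PySem.Dict.counter combo).size = (PySem.Set.ofList combo).length := by
        rw [show (PySem.Dict.counter combo).size = (PySem.Dict.counter combo).items.length from rfl,
          PySem.Dict.items_counter, List.length_map]
      rw [hsize, hkeys,
        pv_sortedCards_eq (PySem.Set.ofList combo) (PySem.Set.nodup_ofList combo) hsub]
      by_cases h2 : 2 ≤ (PySem.Set.ofList combo).length
      · rw [if_neg (by omega)]
        by_cases hcs : pvConsec (pvLow.filter (fun r => decide (r ∈ PySem.Set.ofList combo)))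
        · rw [(pv_consec_iff _).mpr hcs]
          rw [if_neg (by simp)]
          exact iff_of_true rfl ⟨hv, show pvCond combo from ⟨h3, h2, hcs⟩⟩
        · have hany : ((PySem.List.pyRange 0
              (PySem.List.len (pvLow.filter (fun r => decide (r ∈ PySem.Set.ofList combo))) - 1) 1).any
              (fun i => pvGetRank (PySem.List.pyGetD (pvLow.filter (fun r => decide (r ∈ PySem.Set.ofList combo))) i "") !=
                pvGetRank (PySem.List.pyGetD (pvLow.filter (fun r => decide (r ∈ PySem.Set.ofList combo))) (i + 1) "") - 1)) = true := by
            cases h : ((PySem.List.pyRange 0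
              (PySem.List.len (pvLow.filter (fun r => decide (r ∈ PySem.Set.ofList combo))) - 1) 1).any
              (fun i => pvGetRank (PySem.List.pyGetD (pvLow.filter (fun r => decide (r ∈ PySem.Set.ofList combo))) i "") !=
                pvGetRank (PySem.List.pyGetD (pvLow.filter (fun r => decide (r ∈ PySem.Set.ofList combo))) (i + 1) "") - 1))
            · exact absurd ((pv_consec_iff _).mp h) hcs
            · rfl
          rw [hany, if_pos rfl]
          refine iff_of_false (by simp) ?_
          intro hand
          obtain ⟨_, hcond⟩ := hand
          obtain ⟨_, _, hc⟩ := hcond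
          exact hcs hc
      · rw [if_pos (by omega)]
        refine iff_of_false (by simp) ?_
        intro hand
        obtain ⟨_, hcond⟩ := hand
        obtain ⟨_, hc2, _⟩ := hcond
        exact h2 hc2
    · have g3 : ((PySem.Dict.counter combo).keys.any
          (fun rank => (PySem.Dict.counter combo).getD rank 0 != 3)) = true := by
        push Not at h3
        obtain ⟨c, hc, hne⟩ := h3
        rw [List.any_eq_true]
        refine ⟨c, by rw [hkeys]; exact (PySem.Set.mem_ofList _ _).mpr hc, ?_⟩
        rw [PySem.Dict.getD_counter]
        simpa using fun hh => hne (by exact_mod_cast hh)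
      rw [g3, if_pos rfl]
      refine iff_of_false (by simp) ?_
      intro hand
      obtain ⟨_, hcond⟩ := hand
      obtain ⟨hc3, _, _⟩ := hcond
      exact h3 hc3

lemma pv_low_index (c : String) (h : c ∈ pvLow) :
    PySem.List.index? pvRanks c = some (pvGetRank c).toNat ∧ (pvGetRank c).toNat < 12 := by
  simp only [pvLow, List.mem_cons, List.not_mem_nil, or_false] at h
  rcases h with rfl|rfl|rfl|rfl|rfl|rfl|rfl|rfl|rfl|rfl|rfl|rfl <;> exact ⟨by decide, by decide⟩


lemma pv_collect_valid (combo : List String) (h : pvValid combo) :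
    pvCollectIdxs 12 combo = some (pvIdxs combo) := by
  induction combo with
  | nil => rfl
  | cons c rest ih =>
    have hc : c ∈ pvLow := h c (List.mem_cons_self ..)
    have hrest : pvValid rest := fun x hx => h x (List.mem_cons_of_mem _ hx)
    obtain ⟨h1, h2⟩ := pv_low_index c hc
    have hcast : (((pvGetRank c).toNat : Nat) : Int) = pvGetRank c := by
      simp [pvGetRank]
    simp only [pvCollectIdxs]
    rw [h1]
    simp [if_neg (by omega : ¬ 12 ≤ (pvGetRank c).toNat), ih hrest, pvIdxs, hcast]

lemma pv_collect_invalid (combo : List String) (h : ¬ pvValid combo) :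
    pvCollectIdxs 12 combo = none := by
  induction combo with
  | nil => exact absurd (fun x hx => absurd hx (List.not_mem_nil)) h
  | cons c rest ih =>
    by_cases hc : c ∈ pvLow
    · have hrest : ¬ pvValid rest := by
        intro hr
        exact h (fun x hx => by
          rcases List.mem_cons.mp hx with rfl|hx
          · exact hc
          · exact hr x hx)
      obtain ⟨h1, h2⟩ := pv_low_index c hc
      have h1' : List.idxOf? c pvRanks = some (pvGetRank c).toNat := h1
      simp [pvCollectIdxs, h1', ih hrest]
    · by_cases hr : c ∈ pvRanks
      · have : c = "2" ∨ c = "B" ∨ c = "R" := by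
          by_contra hcon
          push Not at hcon
          exact hc ((pv_mem_low_iff c).mpr ⟨hr, hcon.1, hcon.2.1, hcon.2.2⟩)
        rcases this with rfl|rfl|rfl
        · simp [pvCollectIdxs, show List.idxOf? "2" pvRanks = some 12 from by decide]
        · simp [pvCollectIdxs, show List.idxOf? "B" pvRanks = some 13 from by decide]
        · simp [pvCollectIdxs, show List.idxOf? "R" pvRanks = some 14 from by decide]
      · have hn : List.idxOf? c pvRanks = none := (PySem.List.index?_eq_none_iff pvRanks c).mpr hr
        simp [pvCollectIdxs, hn]

lemma pv_runFrom_length (p : Int) (k : Nat) : (pvRunFrom p k).length = 3 * k := by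
  induction k generalizing p with
  | zero => rfl
  | succ k ih => simp [pvRunFrom, ih]; omega


lemma pv_runFrom_bounds (p : Int) (k : Nat) : ∀ x ∈ pvRunFrom p k, p + 1 ≤ x ∧ x ≤ p + k := by
  induction k generalizing p with
  | zero => simp [pvRunFrom]
  | succ k ih =>
    intro x hx
    simp only [pvRunFrom, List.mem_cons] at hx
    rcases hx with rfl|rfl|rfl|hx
    · push_cast; omega
    · push_cast; omega
    · push_cast; omega
    · have := ih (p+1) x hx; push_cast at this ⊢; omega


lemma pv_runFrom_pairwise (p : Int) (k : Nat) : (pvRunFrom p k).Pairwise (· ≤ ·) := by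
  induction k generalizing p with
  | zero => simp [pvRunFrom]
  | succ k ih =>
    have hb := pv_runFrom_bounds (p+1) k
    simp only [pvRunFrom, List.pairwise_cons]
    refine ⟨?_, ?_, ?_⟩
    · intro x hx
      have h2 := pv_runFrom_bounds p (k+1) x
        (by simp only [pvRunFrom, List.mem_cons] at hx ⊢; tauto)
      push_cast at h2; omega
    · intro x hx
      have h2 := pv_runFrom_bounds p (k+1) x
        (by simp only [pvRunFrom, List.mem_cons] at hx ⊢; tauto)
      push_cast at h2; omega
    · refine ⟨?_, ih (p+1)⟩
      intro x hx
      have h2 := pv_runFrom_bounds p (k+1) x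
        (by simp only [pvRunFrom, List.mem_cons] at hx ⊢; tauto)
      push_cast at h2; omega

lemma pv_runFrom_count (p : Int) (k : Nat) (v : Int) :
    (pvRunFrom p k).count v = if p + 1 ≤ v ∧ v ≤ p + k then 3 else 0 := by
  induction k generalizing p with
  | zero =>
    simp only [pvRunFrom, List.count_nil]
    rw [if_neg (by push_cast; omega)]
  | succ k ih =>
    simp only [pvRunFrom, List.count_cons, ih (p+1), beq_iff_eq]
    push_cast
    split_ifs <;> omega

lemma pv_mem_runFrom (p : Int) (k : Nat) (v : Int) :
    v ∈ pvRunFrom p k ↔ p + 1 ≤ v ∧ v ≤ p + k := by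
  rw [← List.count_pos_iff, pv_runFrom_count]
  split <;> simp_all


lemma pv_groups_iff (s : List Int) (p : Int) :
    pvGroups s p = true ↔ ∃ k, s = pvRunFrom p k := by
  fun_induction pvGroups s p with
  | case1 p =>
    simp only [true_iff]
    exact ⟨0, rfl⟩
  | case2 a b c rest prev ih =>
    simp only [Bool.and_eq_true, beq_iff_eq, ih]
    constructor
    · rintro ⟨⟨⟨rfl, rfl⟩, rfl⟩, k, rfl⟩
      exact ⟨k + 1, by simp [pvRunFrom]⟩
    · rintro ⟨k, hk⟩
      cases k with
      | zero => simp [pvRunFrom] at hk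
      | succ k =>
        simp only [pvRunFrom, List.cons.injEq] at hk
        obtain ⟨rfl, rfl, rfl, hrest⟩ := hk
        exact ⟨⟨⟨rfl, rfl⟩, by ring⟩, k, by rw [hrest]⟩
  | case3 s prev h1 h2 =>
    simp only [Bool.false_eq_true, false_iff, not_exists]
    intro k hk
    cases k with
    | zero => exact h1 hk
    | succ k => exact h2 _ _ _ _ hk


lemma pv_eq_of_perm_sorted (l1 l2 : List Int) (h : l1.Perm l2)
    (p1 : l1.Pairwise (· ≤ ·)) (p2 : l2.Pairwise (· ≤ ·)) : l1 = l2 :=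
  PySem.List.eq_of_perm_of_pairwise_le_of_injective (fun x => x) (fun _ _ hx => hx) h
    (by simpa) (by simpa)

lemma pv_low_pairwise : pvLow.Pairwise (fun a b => pvGetRank a < pvGetRank b) := by decide

lemma pv_low_nodup : pvLow.Nodup := by decide

lemma pv_inj_on_low : ∀ c ∈ pvLow, ∀ c' ∈ pvLow, pvGetRank c = pvGetRank c' → c = c' := by decide

lemma pv_count_flatMap_rep (l : List String) (hnd : l.Nodup) (c : String) :
    (l.flatMap (fun r => List.replicate 3 r)).count c = if c ∈ l then 3 else 0 := by
  induction l with
  | nil => simp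
  | cons a l ih =>
    obtain ⟨ha, hnd'⟩ := List.nodup_cons.mp hnd
    simp only [List.flatMap_cons, List.count_append, ih hnd', List.count_replicate,
      List.mem_cons]
    by_cases hca : c = a
    · subst hca
      simp [ha]
    · have : (c == a) = false := by simp [hca]
      simp [hca]
      exact fun hac => hca hac.symm

lemma pv_combo_perm (combo : List String) (h3 : ∀ c ∈ combo, combo.count c = 3) :
    combo.Perm ((PySem.Set.ofList combo).flatMap (fun r => List.replicate 3 r)) := by
  rw [List.perm_iff_count]
  intro c
  rw [pv_count_flatMap_rep _ (PySem.Set.nodup_ofList combo) c]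
  by_cases hc : c ∈ combo
  · simp [PySem.Set.mem_ofList, hc, h3 c hc]
  · simp [PySem.Set.mem_ofList, hc, List.count_eq_zero_of_not_mem hc]

lemma pv_flatMap_runFrom (l : List String) (b : Int)
    (hstep : ∀ i : Nat, i < l.length → pvGetRank (l.getD i "") = b + i) :
    l.flatMap (fun r => List.replicate 3 (pvGetRank r)) = pvRunFrom (b - 1) l.length := by
  induction l generalizing b with
  | nil => rfl
  | cons hd tl ih =>
    have h0 : pvGetRank hd = b := by simpa using hstep 0 (by simp)
    have htl : ∀ i : Nat, i < tl.length → pvGetRank (tl.getD i "") = (b + 1) + i := by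
      intro i hi
      have := hstep (i + 1) (by simpa using hi)
      rw [List.getD_cons_succ] at this
      push_cast at this ⊢
      omega
    rw [List.flatMap_cons, ih (b + 1) htl]
    simp only [List.length_cons, pvRunFrom, h0]
    rw [show b - 1 + 1 = b from by ring, show b + 1 - 1 = b from by ring]
    rfl

lemma pv_index_formula (sl : List String) (hc : pvConsec sl) :
    ∀ i : Nat, i < sl.length → pvGetRank (sl.getD i "") = pvGetRank (sl.getD 0 "") + i := by
  intro i
  induction i with
  | zero => intro _; simp
  | succ i ih =>
    intro hi
    have h1 := hc i (by omega)
    have h2 := ih (by omega)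
    push_cast at h2 ⊢
    omega

lemma pv_sl_perm (combo : List String) (hv : pvValid combo) :
    (pvLow.filter (fun r => decide (r ∈ PySem.Set.ofList combo))).Perm
      (PySem.Set.ofList combo) := by
  rw [List.perm_ext_iff_of_nodup (List.Nodup.filter _ pv_low_nodup)
    (PySem.Set.nodup_ofList combo)]
  intro r
  simp only [List.mem_filter, decide_eq_true_eq, PySem.Set.mem_ofList]
  constructor
  · rintro ⟨_, h⟩; exact h
  · intro h; exact ⟨hv r h, h⟩

lemma pv_t_pairwise (P : String → Bool) :
    ((pvLow.filter P).map pvGetRank).Pairwise (· < ·) :=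
  List.pairwise_map.mpr (List.Pairwise.filter P pv_low_pairwise)

lemma pv_t_mem (combo : List String) (hv : pvValid combo) (v : Int) :
    v ∈ (pvLow.filter (fun r => decide (r ∈ PySem.Set.ofList combo))).map pvGetRank
      ↔ v ∈ pvIdxs combo := by
  simp only [List.mem_map, List.mem_filter, decide_eq_true_eq, PySem.Set.mem_ofList, pvIdxs]
  constructor
  · rintro ⟨r, ⟨_, hr⟩, rfl⟩; exact ⟨r, hr, rfl⟩
  · rintro ⟨c, hc, rfl⟩; exact ⟨c, ⟨hv c hc, hc⟩, rfl⟩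

lemma pv_count_map_low (combo : List String) (hv : pvValid combo) (c : String) (hc : c ∈ combo) :
    (pvIdxs combo).count (pvGetRank c) = combo.count c := by
  rw [pvIdxs, List.count_eq_countP, List.count_eq_countP, List.countP_map]
  apply List.countP_congr
  intro c' hc'
  simp only [Function.comp_apply, beq_iff_eq]
  constructor
  · intro he; exact pv_inj_on_low c' (hv c' hc') c (hv c hc) he
  · rintro rfl; rfl

lemma pv_B_iff (combo : List String) :
    is_sequence_of_triplets_alt combo = true ↔ pvValid combo ∧ pvCondB combo := by
  have hp : (PySem.List.index? pvRanks "2").getD 0 = 12 := by decide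
  by_cases hv : pvValid combo
  · simp only [is_sequence_of_triplets_alt, hp, pv_collect_valid combo hv]
    constructor
    · intro h
      by_cases hg : (PySem.List.len (PySem.List.sorted (pvIdxs combo) (fun x => x) false) < 6 ||
          PySem.Int.mod (PySem.List.len (PySem.List.sorted (pvIdxs combo) (fun x => x) false)) 3 != 0) = true
      · rw [if_pos hg] at h
        exact absurd h (by simp)
      · rw [Bool.not_eq_true] at hg
        rw [hg, if_neg (by simp)] at h
        obtain ⟨k, hk⟩ := (pv_groups_iff _ _).mp h
        refine ⟨hv, PySem.List.pyGetD (PySem.List.sorted (pvIdxs combo) (fun x => x) false) 0 0 - 1,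
          k, ?_, hk⟩
        have hlen : (PySem.List.sorted (pvIdxs combo) (fun x => x) false).length = 3 * k := by
          rw [hk, pv_runFrom_length]
        have h6 : ¬ (PySem.List.len (PySem.List.sorted (pvIdxs combo) (fun x => x) false) < 6) := by
          intro hlt
          rw [Bool.or_eq_false_iff] at hg
          have := hg.1
          simp only [decide_eq_false_iff_not] at this
          exact this hlt
        rw [PySem.List.len_eq, hlen] at h6
        omega
    · rintro ⟨_, p, k, hk2, hrun⟩
      have hlen : (PySem.List.sorted (pvIdxs combo) (fun x => x) false).length = 3 * k := by
        rw [hrun, pv_runFrom_length]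
      have hg : (PySem.List.len (PySem.List.sorted (pvIdxs combo) (fun x => x) false) < 6 ||
          PySem.Int.mod (PySem.List.len (PySem.List.sorted (pvIdxs combo) (fun x => x) false)) 3 != 0) = false := by
        rw [Bool.or_eq_false_iff]
        constructor
        · rw [PySem.List.len_eq, hlen]
          simp only [decide_eq_false_iff_not]
          push_cast
          omega
        · rw [PySem.List.len_eq, hlen]
          rw [show ((3 * k : Nat) : Int) = ((3 * k : Nat) : Int) from rfl]
          rw [show (3 : Int) = ((3 : Nat) : Int) from rfl, PySem.Int.mod_natCast]
          simp [Nat.mul_mod_right]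
      rw [hg, if_neg (by simp)]
      have hhead : PySem.List.pyGetD (PySem.List.sorted (pvIdxs combo) (fun x => x) false) 0 0
          = p + 1 := by
        rw [hrun]
        cases k with
        | zero => omega
        | succ k => simp [pvRunFrom, PySem.List.pyGetD_zero_cons]
      rw [hhead, show p + 1 - 1 = p from by ring]
      exact (pv_groups_iff _ _).mpr ⟨k, hrun⟩
  · have hnone := pv_collect_invalid combo hv
    simp only [is_sequence_of_triplets_alt, hp, hnone]
    exact iff_of_false (by simp) (fun hc => hv hc.1)

lemma pv_core (combo : List String) (h : pvValid combo) : pvCond combo ↔ pvCondB combo := by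
  have hsub : ∀ c ∈ PySem.Set.ofList combo, c ∈ pvLow :=
    fun c hc => h c ((PySem.Set.mem_ofList _ _).mp hc)
  have hslperm := pv_sl_perm combo h
  constructor
  · rintro ⟨h3, h2, hcons⟩
    have hidx := pv_index_formula _ hcons
    have hperm1 := pv_combo_perm combo h3
    have hperm2 : (pvIdxs combo).Perm
        ((pvLow.filter (fun r => decide (r ∈ PySem.Set.ofList combo))).flatMap
          (fun r => List.replicate 3 (pvGetRank r))) := by
      have hmap := hperm1.map pvGetRank
      rw [List.map_flatMap] at hmap
      simp only [List.map_replicate] at hmap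
      exact hmap.trans (List.Perm.flatMap_right _ hslperm.symm)
    have hflat := pv_flatMap_runFrom _
      (pvGetRank ((pvLow.filter (fun r => decide (r ∈ PySem.Set.ofList combo))).getD 0 "")) hidx
    refine ⟨pvGetRank ((pvLow.filter (fun r => decide (r ∈ PySem.Set.ofList combo))).getD 0 "") - 1,
      (pvLow.filter (fun r => decide (r ∈ PySem.Set.ofList combo))).length, ?_, ?_⟩
    · have := hslperm.length_eq
      omega
    · apply pv_eq_of_perm_sorted
      · exact (PySem.List.sorted_perm _ _ _).trans (hperm2.trans (by rw [hflat]))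
      · simpa using PySem.List.sorted_pairwise (pvIdxs combo) (fun x => x)
      · exact pv_runFrom_pairwise _ _
  · rintro ⟨p, k, hk, hrun⟩
    have hpermu : (pvIdxs combo).Perm (pvRunFrom p k) := by
      rw [← hrun]
      exact (PySem.List.sorted_perm _ _ _).symm
    have hmemidx : ∀ v, v ∈ pvIdxs combo ↔ p + 1 ≤ v ∧ v ≤ p + k :=
      fun v => (hpermu.mem_iff).trans (pv_mem_runFrom p k v)
    have h3 : ∀ c ∈ combo, combo.count c = 3 := by
      intro c hc
      have hmem : pvGetRank c ∈ pvIdxs combo := List.mem_map_of_mem hc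
      have hcount := hpermu.count_eq (pvGetRank c)
      rw [pv_runFrom_count, if_pos ((hmemidx _).mp hmem)] at hcount
      rw [← pv_count_map_low combo h c hc, hcount]
    have htmem : ∀ v,
        v ∈ (pvLow.filter (fun r => decide (r ∈ PySem.Set.ofList combo))).map pvGetRank
          ↔ p + 1 ≤ v ∧ v ≤ p + k :=
      fun v => (pv_t_mem combo h v).trans (hmemidx v)
    have htpw := pv_t_pairwise (fun r => decide (r ∈ PySem.Set.ofList combo))
    have htnodup : ((pvLow.filter (fun r => decide (r ∈ PySem.Set.ofList combo))).map pvGetRank).Nodup :=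
      htpw.imp (fun hab => ne_of_lt hab)
    have htrange : (pvLow.filter (fun r => decide (r ∈ PySem.Set.ofList combo))).map pvGetRank
        = PySem.List.pyRange (p + 1) (p + k + 1) 1 := by
      apply pv_eq_of_perm_sorted
      · rw [List.perm_ext_iff_of_nodup htnodup (PySem.List.nodup_pyRange_one _ _)]
        intro v
        rw [htmem v, PySem.List.mem_pyRange_one]
        omega
      · exact htpw.imp le_of_lt
      · exact (PySem.List.pairwise_lt_pyRange_one _ _).imp le_of_lt
    have hlen_t : (pvLow.filter (fun r => decide (r ∈ PySem.Set.ofList combo))).length = k := by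
      have := congrArg List.length htrange
      rw [List.length_map, PySem.List.length_pyRange_one] at this
      omega
    refine ⟨h3, ?_, ?_⟩
    · have := hslperm.length_eq
      omega
    · intro i hi
      have hi1 : i < (pvLow.filter (fun r => decide (r ∈ PySem.Set.ofList combo))).length := by omega
      have e1 : pvGetRank ((pvLow.filter (fun r => decide (r ∈ PySem.Set.ofList combo))).getD i "")
          = p + 1 + i := by
        have hlt : i < (PySem.List.pyRange (p + 1) (p + k + 1) 1).length := by
          rw [PySem.List.length_pyRange_one]; omega
        have e : ((pvLow.filter (fun r => decide (r ∈ PySem.Set.ofList combo))).map pvGetRank)[i]?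
            = some (p + 1 + i) := by
          rw [htrange, List.getElem?_eq_getElem hlt, PySem.List.getElem_pyRange_one]
        rw [List.getElem?_map, List.getElem?_eq_getElem hi1] at e
        rw [List.getD_eq_getElem _ _ hi1]
        simpa using e
      have e2 : pvGetRank ((pvLow.filter (fun r => decide (r ∈ PySem.Set.ofList combo))).getD (i+1) "")
          = p + 1 + (i + 1) := by
        have hlt : i + 1 < (PySem.List.pyRange (p + 1) (p + k + 1) 1).length := by
          rw [PySem.List.length_pyRange_one]; omega
        have e : ((pvLow.filter (fun r => decide (r ∈ PySem.Set.ofList combo))).map pvGetRank)[i+1]?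
            = some (p + 1 + (i + 1)) := by
          rw [htrange, List.getElem?_eq_getElem hlt, PySem.List.getElem_pyRange_one]
          push_cast
          ring_nf
        rw [List.getElem?_map, List.getElem?_eq_getElem hi] at e
        rw [List.getD_eq_getElem _ _ hi]
        simpa using e
      rw [e1, e2]
      ring

-- ===== VERDICT (by name: the statement is the Claim_ definition above) =====
theorem is_sequence_of_triplets_spec : Claim_equal_is_sequence_of_triplets := by
  intro combo _
  unfold Spec_is_sequence_of_triplets
  have h : is_sequence_of_triplets combo = true ↔ is_sequence_of_triplets_alt combo = true := by
    rw [pv_A_iff, pv_B_iff]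
    constructor
    · rintro ⟨hv, hc⟩; exact ⟨hv, (pv_core combo hv).mp hc⟩
    · rintro ⟨hv, hc⟩; exact ⟨hv, (pv_core combo hv).mpr hc⟩
  exact Bool.eq_iff_iff.mpr h
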